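-- pv_equiv track=rewrite | github.com/TeamYeonJin/DopamineBreaker | backend/services/ai_mission_generator.py | _validate_missions
-- ===== SOURCE A (Python) =====
-- def _validate_missions(missions_data):
--     """생성된 미션의 유효성을 검증합니다."""
--     try:
--         # Bronze 3개, Silver 2개, Gold 2개가 있는지 확인
--         if len(missions_data.get('bronze', [])) != 3:
--             return False
--         if len(missions_data.get('silver', [])) != 2:
--             return False
--         if len(missions_data.get('gold', [])) != 2:
--             return False
--
--         # Bronze 미션 시간 검증 (3-10분)
--         for mission in missions_data['bronze']:
--             if not (3 <= mission['duration'] <= 10):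
--                 return False
--
--         # Silver 미션 시간 검증 (10-20분)
--         for mission in missions_data['silver']:
--             if not (10 <= mission['duration'] <= 20):
--                 return False
--
--         # Gold 미션 시간 검증 (20-40분)
--         for mission in missions_data['gold']:
--             if not (20 <= mission['duration'] <= 40):
--                 return False
--
--         return True
--
--     except (KeyError, TypeError):
--         return False
-- ===== SOURCE B (Python) =====
-- _RANGES = {'bronze': (3, 10), 'silver': (10, 20), 'gold': (20, 40)}
-- _REQUIRED = {'bronze': 3, 'silver': 2, 'gold': 2}
--
-- def _validate_missions(missions_data):
--     """Single data-driven pass over the dict's items: tally per-tier mission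
--     counts while range-checking durations, then compare the tally with the
--     required counts dict."""
--     counts = {}
--     for tier, missions in missions_data.items():
--         rng = _RANGES.get(tier)
--         if rng is None:
--             continue
--         lo, hi = rng
--         for m in missions:
--             if not (lo <= m.get('duration', lo - 1) <= hi):
--                 return False
--         counts[tier] = len(missions)
--     return counts == _REQUIRED
-- ===== Notes on version B (the rewrite author's own statement) =====
-- stated objective: alternative
-- what changed: Instead of A's six fixed keyed checks (three .get count tests then three hard-coded duration loops), B makes one data-driven pass over missions_data.items(), range-checking each encountered tier against a bounds table while tallying per-tier counts into a dict, and decides by comparing the tally dict to the required-counts dict at the end.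
import Mathlib
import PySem

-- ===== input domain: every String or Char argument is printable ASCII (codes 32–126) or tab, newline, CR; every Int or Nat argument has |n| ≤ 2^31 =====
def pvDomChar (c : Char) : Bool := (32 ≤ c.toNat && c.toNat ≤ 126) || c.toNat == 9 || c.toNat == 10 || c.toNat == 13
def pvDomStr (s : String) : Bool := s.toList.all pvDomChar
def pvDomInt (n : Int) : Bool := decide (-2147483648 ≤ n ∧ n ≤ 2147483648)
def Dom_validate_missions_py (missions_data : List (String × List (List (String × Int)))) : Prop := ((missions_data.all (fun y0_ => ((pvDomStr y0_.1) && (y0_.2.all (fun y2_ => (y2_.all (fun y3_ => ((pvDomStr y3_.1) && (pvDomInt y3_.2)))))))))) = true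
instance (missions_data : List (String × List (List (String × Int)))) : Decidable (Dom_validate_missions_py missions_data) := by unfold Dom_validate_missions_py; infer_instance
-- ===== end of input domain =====

-- B replaces A's six fixed keyed checks by one data-driven pass over the dict's items
-- that range-checks and tallies per-tier counts, comparing the tally dict at the end (objective: alternative).

-- ===== PORT A =====
-- A's per-tier duration loop: mission['duration'] raising KeyError is caught by A's
-- except (KeyError, TypeError) and yields False, so a missing key maps to `false` here.
def aDurLoop (lo hi : Int) : List (List (String × Int)) → Bool
  | [] => true
  | m :: rest =>
    match (PySem.Dict.mk m).get? "duration" with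
    | none => false                                   -- KeyError → except → False
    | some d => if lo ≤ d ∧ d ≤ hi then aDurLoop lo hi rest else false

def validate_missions_py (missions_data : List (String × List (List (String × Int)))) : Bool :=
  if ((PySem.Dict.mk missions_data).getD "bronze" []).length ≠ 3 then false
  else if ((PySem.Dict.mk missions_data).getD "silver" []).length ≠ 2 then false
  else if ((PySem.Dict.mk missions_data).getD "gold" []).length ≠ 2 then false
  else if ¬ aDurLoop 3 10 ((PySem.Dict.mk missions_data).getD "bronze" []) then false
  else if ¬ aDurLoop 10 20 ((PySem.Dict.mk missions_data).getD "silver" []) then false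
  else if ¬ aDurLoop 20 40 ((PySem.Dict.mk missions_data).getD "gold" []) then false
  else true

-- ===== PORT B =====
def bRanges : PySem.Dict String (Int × Int) :=
  PySem.Dict.mk [("bronze", (3, 10)), ("silver", (10, 20)), ("gold", (20, 40))]

def bRequired : PySem.Dict String Int :=
  PySem.Dict.mk [("bronze", 3), ("silver", 2), ("gold", 2)]

-- Python's missions_data.items(): each key once, in first-occurrence order, with its
-- first-match value — exactly the dict the association-list encoding represents
-- (the identity on any list that encodes a dict, i.e. has distinct keys).
def bItemsGo {α : Type} (seen : List String) : List (String × α) → List (String × α)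
  | [] => []
  | p :: rest => if seen.contains p.1 then bItemsGo seen rest else p :: bItemsGo (p.1 :: seen) rest

def bItems {α : Type} (l : List (String × α)) : List (String × α) := bItemsGo [] l

-- B's inner for-loop: false on the first out-of-range (or missing) duration
def bInRange (lo hi : Int) : List (List (String × Int)) → Bool
  | [] => true
  | m :: rest =>
    let d := (PySem.Dict.mk m).getD "duration" (lo - 1)
    if lo ≤ d ∧ d ≤ hi then bInRange lo hi rest else false

-- B's outer loop over the items, threading the counts dict; none = early `return False`
def bOuter : List (String × List (List (String × Int))) → PySem.Dict String Int → Option (PySem.Dict String Int)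
  | [], counts => some counts
  | (tier, missions) :: rest, counts =>
    match bRanges.get? tier with
    | none => bOuter rest counts
    | some (lo, hi) =>
      if bInRange lo hi missions then bOuter rest (counts.insert tier (missions.length : Int))
      else none

-- Python dict `==` ignores insertion order: equal key sets and equal value per key
-- (exact here: string keys, int values)
def pyDictEq (d e : PySem.Dict String Int) : Bool :=
  PySem.Set.equal d.keys e.keys && d.keys.all (fun k => d.get? k == e.get? k)

def validate_missions_py_alt (missions_data : List (String × List (List (String × Int)))) : Bool :=
  match bOuter (bItems missions_data) PySem.Dict.empty with
  | none => false
  | some counts => pyDictEq counts bRequired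

-- ===== PRECONDITION & SPEC =====
def Spec_validate_missions_py (missions_data : List (String × List (List (String × Int)))) (out : Bool) : Prop := out = validate_missions_py_alt missions_data
instance (missions_data : List (String × List (List (String × Int)))) (out : Bool) : Decidable (Spec_validate_missions_py missions_data out) := by unfold Spec_validate_missions_py; infer_instance

-- ===== CLAIM (what is proved, stated in full; the proofs are below) =====
def Claim_equal_validate_missions_py : Prop := ∀ (missions_data : List (String × List (List (String × Int)))), Dom_validate_missions_py missions_data → Spec_validate_missions_py missions_data (validate_missions_py missions_data)

-- ===== LEMMAS AND PROOFS =====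

-- proof-only loop characterisations
def bStep (c : PySem.Dict String Int) (p : String × List (List (String × Int))) : PySem.Dict String Int :=
  if bRanges.contains p.1 then c.insert p.1 (p.2.length : Int) else c

def bAllOK (l : List (String × List (List (String × Int)))) : Bool :=
  l.all (fun p => match bRanges.get? p.1 with | none => true | some q => bInRange q.1 q.2 p.2)

def lkv (k : String) (l : List (String × List (List (String × Int)))) : List (List (String × Int)) :=
  ((List.find? (fun q => q.1 == k) l).map (·.2)).getD []

theorem bOuter_eq (l : List (String × List (List (String × Int)))) (c : PySem.Dict String Int) :
    bOuter l c = if bAllOK l then some (l.foldl bStep c) else none := by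
  induction l generalizing c with
  | nil => rfl
  | cons p rest ih =>
    obtain ⟨tier, missions⟩ := p
    have hA : bAllOK ((tier, missions) :: rest)
        = ((match bRanges.get? tier with | none => true | some q => bInRange q.1 q.2 missions)
            && bAllOK rest) := by
      simp [bAllOK]
    cases h : bRanges.get? tier with
    | none =>
      have hc : bRanges.contains tier = false := by
        rw [PySem.Dict.contains_eq_isSome_get?, h]; rfl
      simp only [bOuter, h, hA, Bool.true_and, List.foldl_cons, bStep, hc, if_neg Bool.false_ne_true]
      exact ih c
    | some q =>
      obtain ⟨lo, hi⟩ := q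
      have hc : bRanges.contains tier = true := by
        rw [PySem.Dict.contains_eq_isSome_get?, h]; rfl
      cases hr : bInRange lo hi missions with
      | true =>
        simp only [bOuter, h, hr, hA, Bool.true_and, List.foldl_cons, bStep, hc, if_true]
        exact ih _
      | false =>
        simp [bOuter, h, hr, hA]

theorem find_bItemsGo {α : Type} (k : String) (seen : List String) (l : List (String × α)) :
    List.find? (fun q => q.1 == k) (bItemsGo seen l)
      = if seen.contains k then none else List.find? (fun q => q.1 == k) l := by
  induction l generalizing seen with
  | nil => cases h : seen.contains k <;> simp [bItemsGo, h]
  | cons p rest ih =>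
    rw [bItemsGo]
    cases hs : seen.contains p.1 with
    | true =>
      rw [if_pos rfl, ih]
      cases hk : seen.contains k with
      | true => simp
      | false =>
        have hpk : p.1 ≠ k := fun e => by rw [e] at hs; rw [hs] at hk; cases hk
        have hne : (p.1 == k) = false := by simpa using hpk
        simp [List.find?_cons, hne]
    | false =>
      rw [if_neg (by simp), List.find?_cons, List.find?_cons]
      cases hk : (p.1 == k) with
      | true =>
        have h0 : seen.contains k = false := by rwa [← eq_of_beq hk]
        have hm : k ∉ seen := by simpa using h0
        simp [hm]
      | false =>
        rw [ih]
        have hk' : (k == p.1) = false := by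
          cases he : k == p.1
          · rfl
          · rw [eq_of_beq he] at hk; simp at hk
        have hmm : ((p.1 :: seen).contains k) = seen.contains k := by
          simp only [List.contains_cons, hk', Bool.false_or]
        rw [hmm]

theorem find_bItems {α : Type} (k : String) (l : List (String × α)) :
    List.find? (fun q => q.1 == k) (bItems l) = List.find? (fun q => q.1 == k) l := by
  rw [bItems, find_bItemsGo]; rfl

theorem nodup_keys_bItemsGo {α : Type} (seen : List String) (l : List (String × α)) :
    ((bItemsGo seen l).map Prod.fst).Nodup
      ∧ ∀ x ∈ (bItemsGo seen l).map Prod.fst, seen.contains x = false := by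
  induction l generalizing seen with
  | nil => simp [bItemsGo]
  | cons p rest ih =>
    rw [bItemsGo]
    by_cases hs : seen.contains p.1 = true
    · rw [if_pos hs]; exact ih seen
    · rw [if_neg hs, List.map_cons]
      obtain ⟨hnd, hfresh⟩ := ih (p.1 :: seen)
      refine ⟨List.nodup_cons.mpr ⟨?_, hnd⟩, ?_⟩
      · intro hmem
        have := hfresh _ hmem
        simp [List.contains_cons] at this
      · intro x hx
        rcases List.mem_cons.mp hx with h | h
        · subst h; exact Bool.eq_false_iff.mpr hs
        · have := hfresh _ h
          simp [List.contains_cons] at this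
          exact Bool.eq_false_iff.mpr (by simp [this.2])

theorem nodup_keys_bItems {α : Type} (l : List (String × α)) : ((bItems l).map Prod.fst).Nodup :=
  (nodup_keys_bItemsGo [] l).1

theorem bRanges_get?_of_ne (t : String) (h1 : t ≠ "bronze") (h2 : t ≠ "silver") (h3 : t ≠ "gold") :
    bRanges.get? t = none := by
  simp only [bRanges, PySem.Dict.get?, PySem.Dict.items, List.find?]
  have e1 : (("bronze" : String) == t) = false := by simpa using fun e => h1 e.symm
  have e2 : (("silver" : String) == t) = false := by simpa using fun e => h2 e.symm
  have e3 : (("gold" : String) == t) = false := by simpa using fun e => h3 e.symm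
  simp [e1, e2, e3]

theorem lkv_cons (k t : String) (ms : List (List (String × Int)))
    (rest : List (String × List (List (String × Int)))) :
    lkv k ((t, ms) :: rest) = if t = k then ms else lkv k rest := by
  simp only [lkv, List.find?_cons]
  by_cases h : t = k
  · simp [h]
  · have : ((t, ms).1 == k) = false := by simpa using h
    simp [this, h]

theorem lkv_of_not_mem (k : String) (l : List (String × List (List (String × Int))))
    (h : k ∉ l.map Prod.fst) : lkv k l = [] := by
  have : List.find? (fun q => q.1 == k) l = none := by
    rw [List.find?_eq_none]
    intro x hx hb
    exact h (List.mem_map.mpr ⟨x, hx, eq_of_beq hb⟩)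
  simp [lkv, this]

theorem allOK_char (l : List (String × List (List (String × Int)))) (h : (l.map Prod.fst).Nodup) :
    bAllOK l = (bInRange 3 10 (lkv "bronze" l) &&
      (bInRange 10 20 (lkv "silver" l) && bInRange 20 40 (lkv "gold" l))) := by
  induction l with
  | nil => rfl
  | cons p rest ih =>
    obtain ⟨t, ms⟩ := p
    rw [List.map_cons, List.nodup_cons] at h
    obtain ⟨hnt, hnd⟩ := h
    have hA : bAllOK ((t, ms) :: rest)
        = ((match bRanges.get? t with | none => true | some q => bInRange q.1 q.2 ms)
            && bAllOK rest) := by simp [bAllOK]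
    rw [hA, ih hnd, lkv_cons, lkv_cons, lkv_cons]
    by_cases h1 : t = "bronze"
    · subst h1
      have : lkv "bronze" rest = [] := lkv_of_not_mem _ _ hnt
      rw [this]
      simp only [if_pos rfl, if_neg (by decide : ¬("bronze" : String) = "silver"),
        if_neg (by decide : ¬("bronze" : String) = "gold")]
      have : bRanges.get? "bronze" = some (3, 10) := by rfl
      rw [this]
      simp [bInRange, Bool.and_left_comm, Bool.and_comm, Bool.and_assoc]
    · by_cases h2 : t = "silver"
      · subst h2
        have : lkv "silver" rest = [] := lkv_of_not_mem _ _ hnt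
        rw [this]
        simp only [if_pos rfl, if_neg (by decide : ¬("silver" : String) = "bronze"),
          if_neg (by decide : ¬("silver" : String) = "gold")]
        have : bRanges.get? "silver" = some (10, 20) := by rfl
        rw [this]
        simp [bInRange, Bool.and_left_comm, Bool.and_comm, Bool.and_assoc]
      · by_cases h3 : t = "gold"
        · subst h3
          have : lkv "gold" rest = [] := lkv_of_not_mem _ _ hnt
          rw [this]
          simp only [if_pos rfl, if_neg (by decide : ¬("gold" : String) = "bronze"),
            if_neg (by decide : ¬("gold" : String) = "silver")]
          have : bRanges.get? "gold" = some (20, 40) := by rfl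
          rw [this]
          simp [bInRange, Bool.and_left_comm, Bool.and_comm, Bool.and_assoc]
        · rw [bRanges_get?_of_ne t h1 h2 h3]
          simp [h1, h2, h3]

theorem foldl_bStep_get?_none (l : List (String × List (List (String × Int))))
    (c : PySem.Dict String Int) (k : String)
    (h : List.find? (fun q => q.1 == k) l = none) :
    (l.foldl bStep c).get? k = c.get? k := by
  induction l generalizing c with
  | nil => rfl
  | cons p rest ih =>
    rw [List.find?_cons] at h
    cases hk : (p.1 == k) with
    | true => rw [hk] at h; cases h
    | false =>
      rw [hk] at h
      rw [List.foldl_cons, ih _ h]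
      have hne : p.1 ≠ k := by simpa using hk
      unfold bStep
      split
      · exact PySem.Dict.get?_insert_of_ne c _ (fun e => hne e.symm)
      · rfl

theorem foldl_bStep_get?_some (l : List (String × List (List (String × Int))))
    (c : PySem.Dict String Int) (k : String) (p : String × List (List (String × Int)))
    (hk : bRanges.contains k = true) (hnd : (l.map Prod.fst).Nodup)
    (h : List.find? (fun q => q.1 == k) l = some p) :
    (l.foldl bStep c).get? k = some (p.2.length : Int) := by
  induction l generalizing c with
  | nil => cases h
  | cons q rest ih =>
    rw [List.map_cons, List.nodup_cons] at hnd
    obtain ⟨hq, hnd⟩ := hnd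
    rw [List.find?_cons] at h
    cases hqk : (q.1 == k) with
    | true =>
      rw [hqk] at h
      injection h with h; subst h
      have hek : q.1 = k := eq_of_beq hqk
      have hrest : List.find? (fun r => r.1 == k) rest = none := by
        rw [List.find?_eq_none]
        intro x hx hb
        exact hq (by rw [← hek] at hb; exact (List.mem_map.mpr ⟨x, hx, (eq_of_beq hb).symm ▸ hek ▸ rfl⟩))
      rw [List.foldl_cons, foldl_bStep_get?_none _ _ _ hrest]
      unfold bStep
      rw [hek, if_pos hk]
      exact PySem.Dict.get?_insert_self c k _
    | false =>
      rw [hqk] at h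
      rw [List.foldl_cons]
      exact ih _ hnd h

theorem keys_foldl_bStep (l : List (String × List (List (String × Int)))) (c : PySem.Dict String Int) :
    ∀ k ∈ (l.foldl bStep c).keys, k ∈ c.keys ∨ bRanges.contains k = true := by
  induction l generalizing c with
  | nil => intro k hk; exact Or.inl hk
  | cons p rest ih =>
    intro k hk
    rw [List.foldl_cons] at hk
    rcases ih _ k hk with h | h
    · unfold bStep at h
      by_cases hc : bRanges.contains p.1 = true
      · rw [if_pos hc] at h
        rcases (PySem.Dict.mem_keys_insert _ _ _ _).mp h with he | hm
        · exact Or.inr (he ▸ hc)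
        · exact Or.inl hm
      · rw [if_neg hc] at h; exact Or.inl h
    · exact Or.inr h

theorem get?_count_eq (l : List (String × List (List (String × Int))))
    (hnd : (l.map Prod.fst).Nodup) (k : String) (n : Int) (hn : n ≠ 0) (hk : bRanges.contains k = true) :
    ((l.foldl bStep PySem.Dict.empty).get? k == some n) = decide (((lkv k l).length : Int) = n) := by
  cases h : List.find? (fun q => q.1 == k) l with
  | none =>
    rw [foldl_bStep_get?_none _ _ _ h]
    have hl : lkv k l = [] := by simp [lkv, h]
    rw [hl, PySem.Dict.get?_empty]
    rw [Bool.eq_iff_iff]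
    simp [eq_comm, hn]
  | some p =>
    rw [foldl_bStep_get?_some _ _ _ _ hk hnd h]
    have hl : lkv k l = p.2 := by simp [lkv, h]
    rw [hl]
    rw [Bool.eq_iff_iff]
    simp

theorem pyDictEq_req (C : PySem.Dict String Int)
    (hsub : ∀ k ∈ C.keys, k = "bronze" ∨ k = "silver" ∨ k = "gold") :
    pyDictEq C bRequired = ((C.get? "bronze" == some (3 : Int)) &&
      ((C.get? "silver" == some (2 : Int)) && (C.get? "gold" == some (2 : Int)))) := by
  have hreq : bRequired.keys = ["bronze", "silver", "gold"] := by rfl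
  rw [Bool.eq_iff_iff]
  simp only [pyDictEq, Bool.and_eq_true, List.all_eq_true]
  constructor
  · rintro ⟨heq, hall⟩
    have hmem := (PySem.Set.equal_iff _ _).mp heq
    rw [hreq] at hmem
    have hb : "bronze" ∈ C.keys := (hmem "bronze").mpr (by simp)
    have hs : "silver" ∈ C.keys := (hmem "silver").mpr (by simp)
    have hg : "gold" ∈ C.keys := (hmem "gold").mpr (by simp)
    have eb := hall _ hb
    have es := hall _ hs
    have eg := hall _ hg
    have rb : bRequired.get? "bronze" = some 3 := by rfl
    have rs : bRequired.get? "silver" = some 2 := by rfl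
    have rg : bRequired.get? "gold" = some 2 := by rfl
    rw [rb] at eb; rw [rs] at es; rw [rg] at eg
    exact ⟨eb, es, eg⟩
  · rintro ⟨hb, hs, hg⟩
    have hb' : C.get? "bronze" = some 3 := by simpa using hb
    have hs' : C.get? "silver" = some 2 := by simpa using hs
    have hg' : C.get? "gold" = some 2 := by simpa using hg
    have mb : "bronze" ∈ C.keys := by
      by_contra hmem
      rw [(PySem.Dict.get?_eq_none_iff_not_mem_keys _ _).mpr hmem] at hb'; cases hb'
    have ms : "silver" ∈ C.keys := by
      by_contra hmem
      rw [(PySem.Dict.get?_eq_none_iff_not_mem_keys _ _).mpr hmem] at hs'; cases hs'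
    have mg : "gold" ∈ C.keys := by
      by_contra hmem
      rw [(PySem.Dict.get?_eq_none_iff_not_mem_keys _ _).mpr hmem] at hg'; cases hg'
    constructor
    · apply (PySem.Set.equal_iff _ _).mpr
      intro x
      rw [hreq]
      constructor
      · intro hx
        rcases hsub x hx with h | h | h <;> simp [h]
      · intro hx
        rcases (by simpa using hx : x = "bronze" ∨ x = "silver" ∨ x = "gold") with h | h | h
        · exact h ▸ mb
        · exact h ▸ ms
        · exact h ▸ mg
    · intro k hk
      rcases hsub k hk with h | h | h <;> subst h
      · rw [hb']; rfl
      · rw [hs']; rfl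
      · rw [hg']; rfl

theorem getD_mk_eq_lkv (md : List (String × List (List (String × Int)))) (k : String) :
    (PySem.Dict.mk md).getD k [] = lkv k (bItems md) := by
  rw [PySem.Dict.getD_eq_get?_getD]
  simp only [PySem.Dict.get?, PySem.Dict.items, lkv, find_bItems]

theorem aDurLoop_eq (lo hi : Int) (ms : List (List (String × Int))) :
    aDurLoop lo hi ms = bInRange lo hi ms := by
  induction ms with
  | nil => rfl
  | cons m rest ih =>
    simp only [aDurLoop, bInRange]
    cases h : (PySem.Dict.mk m).get? "duration" with
    | none =>
      have hg : (PySem.Dict.mk m).getD "duration" (lo - 1) = lo - 1 := by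
        rw [PySem.Dict.getD_eq_get?_getD, h]; rfl
      rw [hg, if_neg (by omega)]
    | some d =>
      have hg : (PySem.Dict.mk m).getD "duration" (lo - 1) = d := by
        rw [PySem.Dict.getD_eq_get?_getD, h]; rfl
      rw [hg, ih]

-- ===== VERDICT (by name: the statement is the Claim_ definition above) =====
theorem validate_missions_py_spec : Claim_equal_validate_missions_py := by
  intro md _
  unfold Spec_validate_missions_py
  have hnd := nodup_keys_bItems md
  unfold validate_missions_py validate_missions_py_alt
  rw [bOuter_eq]
  rw [getD_mk_eq_lkv, getD_mk_eq_lkv, getD_mk_eq_lkv, aDurLoop_eq, aDurLoop_eq, aDurLoop_eq]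
  cases hA : bAllOK (bItems md) with
  | false =>
    simp only [Bool.false_eq_true, if_false]
    rw [allOK_char _ hnd] at hA
    by_cases h1 : (lkv "bronze" (bItems md)).length = 3 <;>
      by_cases h2 : (lkv "silver" (bItems md)).length = 2 <;>
        by_cases h3 : (lkv "gold" (bItems md)).length = 2 <;>
          cases e1 : bInRange 3 10 (lkv "bronze" (bItems md)) <;>
            cases e2 : bInRange 10 20 (lkv "silver" (bItems md)) <;>
              cases e3 : bInRange 20 40 (lkv "gold" (bItems md)) <;>
                (simp_all; try omega)
  | true =>
    rw [if_pos rfl]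
    have hsub : ∀ k ∈ ((bItems md).foldl bStep PySem.Dict.empty).keys,
        k = "bronze" ∨ k = "silver" ∨ k = "gold" := by
      intro k hk
      rcases keys_foldl_bStep _ _ k hk with h | h
      · simp [PySem.Dict.keys_empty] at h
      · have : k ∈ bRanges.keys := (PySem.Dict.contains_iff_mem_keys _ _).mp h
        have hk3 : bRanges.keys = ["bronze", "silver", "gold"] := by rfl
        rw [hk3] at this
        simpa using this
    show _ = pyDictEq (List.foldl bStep PySem.Dict.empty (bItems md)) bRequired
    rw [pyDictEq_req _ hsub]
    rw [get?_count_eq _ hnd _ _ (by omega) (by rfl),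
        get?_count_eq _ hnd _ _ (by omega) (by rfl),
        get?_count_eq _ hnd _ _ (by omega) (by rfl)]
    rw [allOK_char _ hnd] at hA
    simp only [Bool.and_eq_true] at hA
    obtain ⟨e1, e2, e3⟩ := hA
    by_cases h1 : (lkv "bronze" (bItems md)).length = 3 <;>
      by_cases h2 : (lkv "silver" (bItems md)).length = 2 <;>
        by_cases h3 : (lkv "gold" (bItems md)).length = 2 <;>
          (simp_all; try omega)
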